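-- pv_equiv track=rewrite | github.com/GLA-Python/surprise-test-Vanshi1804 | answer1.py | check
-- ===== SOURCE A (Python) =====
-- def check(a):
--     x = []
--     y = []
--     z = []
--     v = []
--     w = []
--     for i in range(len(a)-1):
--         x.append(a[i])
--     for i in range(1, len(a)):
--         y.append(a[i])
--     for i in range(len(x)):
--         diff = y[i] - x[i]
--         z.append(diff**2)
--     for i in range(len(z)-1):
--         v.append(z[i])
--
--     for i in range(1, len(z)):
--         w.append(z[i])
--
--     for i in range(len(v)):
--         if w[i]<=v[i]:
--             return False
--     return True
-- ===== SOURCE B (Python) =====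
-- def check(a):
--     prev = None
--     for i in range(1, len(a)):
--         cur = (a[i] - a[i - 1]) ** 2
--         if prev is not None and cur <= prev:
--             return False
--         prev = cur
--     return True
-- ===== Notes on version B (the rewrite author's own statement) =====
-- stated objective: faster
-- what changed: Replaced the five list-building passes (x, y, z, v, w) and the final index loop by a single pass that keeps only the previous squared difference in a scalar and compares the current one against it inline.
import Mathlib
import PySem

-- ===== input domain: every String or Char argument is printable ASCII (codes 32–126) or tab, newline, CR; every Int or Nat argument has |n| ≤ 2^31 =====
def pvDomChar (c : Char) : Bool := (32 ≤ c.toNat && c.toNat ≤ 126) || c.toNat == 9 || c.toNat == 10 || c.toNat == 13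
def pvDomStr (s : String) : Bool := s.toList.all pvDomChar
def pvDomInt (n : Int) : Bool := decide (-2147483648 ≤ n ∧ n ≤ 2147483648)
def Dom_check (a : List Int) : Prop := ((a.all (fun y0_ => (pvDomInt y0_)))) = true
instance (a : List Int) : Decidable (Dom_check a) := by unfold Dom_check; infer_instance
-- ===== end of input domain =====

-- B replaces A's five auxiliary lists by a single pass keeping only the previous squared
-- difference in a scalar; same return value, simpler and O(1) extra space.

-- ===== PORT A =====
-- final loop of A: iterates over the index range, early-returns False when w[i] <= v[i]
def checkLoopA (v w : List Int) : List Int → Bool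
  | [] => true
  | i :: rest =>
    if PySem.List.pyGetD w i 0 ≤ PySem.List.pyGetD v i 0 then false
    else checkLoopA v w rest

-- all indices used are in range, so pyGetD with default 0 is exact here
def check (a : List Int) : Bool :=
  let x := (PySem.List.pyRange 0 ((a.length : Int) - 1) 1).foldl
             (fun acc i => acc ++ [PySem.List.pyGetD a i 0]) []
  let y := (PySem.List.pyRange 1 (a.length : Int) 1).foldl
             (fun acc i => acc ++ [PySem.List.pyGetD a i 0]) []
  let z := (PySem.List.pyRange 0 (x.length : Int) 1).foldl
             (fun acc i => acc ++ [(PySem.List.pyGetD y i 0 - PySem.List.pyGetD x i 0) ^ 2]) []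
  let v := (PySem.List.pyRange 0 ((z.length : Int) - 1) 1).foldl
             (fun acc i => acc ++ [PySem.List.pyGetD z i 0]) []
  let w := (PySem.List.pyRange 1 (z.length : Int) 1).foldl
             (fun acc i => acc ++ [PySem.List.pyGetD z i 0]) []
  checkLoopA v w (PySem.List.pyRange 0 (v.length : Int) 1)

-- ===== PORT B =====
-- one pass: prev is the previous squared difference (none before the first one)
def altLoop (prev : Option Int) (p : Int) : List Int → Bool
  | [] => true
  | c :: rest =>
    let cur := (c - p) ^ 2
    match prev with
    | some pv => if cur ≤ pv then false else altLoop (some cur) c rest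
    | none => altLoop (some cur) c rest

def check_alt (a : List Int) : Bool :=
  match a with
  | [] => true
  | h :: t => altLoop none h t

-- ===== PRECONDITION & SPEC =====
def Spec_check (a : List Int) (out : Bool) : Prop := out = check_alt a
instance (a : List Int) (out : Bool) : Decidable (Spec_check a out) := by unfold Spec_check; infer_instance

-- ===== CLAIM (what is proved, stated in full; the proofs are below) =====
def Claim_equal_check : Prop := ∀ (a : List Int), Dom_check a → Spec_check a (check a)

-- ===== LEMMAS AND PROOFS =====

-- the list of squared consecutive differences
def sqd : List Int → List Int
  | p :: c :: t => (c - p) ^ 2 :: sqd (c :: t)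
  | _ => []

-- boolean "strictly increasing" on consecutive elements
def chainB : List Int → Bool
  | p :: c :: t => if c ≤ p then false else chainB (c :: t)
  | _ => true

theorem map_pyGetD_range_pred (xs : List Int) (d : Int) :
    (PySem.List.pyRange 0 ((xs.length : Int) - 1) 1).map (fun i => PySem.List.pyGetD xs i d)
      = xs.dropLast := by
  apply List.ext_getElem
  · simp [PySem.List.length_pyRange_one]
  · intro k h1 h2
    have hk : k < xs.length - 1 := by
      simpa [PySem.List.length_pyRange_one] using h1
    have hkx : k < xs.length := by omega
    simp [PySem.List.getElem_pyRange_one, PySem.List.pyGetD_natCast,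
      List.getElem?_eq_getElem hkx, List.getElem_dropLast]

theorem map_pyGetD_range_drop1 (xs : List Int) (d : Int) :
    (PySem.List.pyRange 1 (xs.length : Int) 1).map (fun i => PySem.List.pyGetD xs i d)
      = xs.drop 1 := by
  have := PySem.List.map_pyGetD_pyRange' xs d (a := 1) (by norm_num)
  simpa using this

theorem map_pyGetD_range_zipWith (xs ys : List Int) (h : xs.length = ys.length) :
    (PySem.List.pyRange 0 (xs.length : Int) 1).map
        (fun i => (PySem.List.pyGetD ys i 0 - PySem.List.pyGetD xs i 0) ^ 2)
      = List.zipWith (fun p c => (c - p) ^ 2) xs ys := by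
  apply List.ext_getElem
  · simp [PySem.List.length_pyRange_one]
    omega
  · intro k h1 h2
    have hk : k < xs.length := by
      simpa [PySem.List.length_pyRange_one] using h1
    have hky : k < ys.length := by omega
    simp [PySem.List.getElem_pyRange_one, PySem.List.pyGetD_natCast,
      List.getElem?_eq_getElem hk, List.getElem?_eq_getElem hky, List.getElem_zipWith]

theorem zipWith_sqd (a : List Int) :
    List.zipWith (fun p c => (c - p) ^ 2) a.dropLast (a.drop 1) = sqd a := by
  match a with
  | [] => simp [sqd]
  | [x] => simp [sqd]
  | p :: c :: t =>
    have ih := zipWith_sqd (c :: t)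
    simp only [List.dropLast_cons₂, List.drop_succ_cons, List.drop_zero, List.zipWith_cons_cons, sqd]
    rw [← ih]
    simp

theorem checkLoopA_eq_all (v w : List Int) (r : List Int) :
    checkLoopA v w r
      = r.all (fun i => !decide (PySem.List.pyGetD w i 0 ≤ PySem.List.pyGetD v i 0)) := by
  induction r with
  | nil => simp [checkLoopA]
  | cons i rest ih =>
    simp only [checkLoopA, List.all_cons, ih]
    by_cases h : PySem.List.pyGetD w i 0 ≤ PySem.List.pyGetD v i 0 <;> simp [h]

theorem allIdx_chainB (z : List Int) :
    ((List.range z.dropLast.length).all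
      (fun k => !decide ((z.drop 1).getD k 0 ≤ z.dropLast.getD k 0))) = chainB z := by
  match z with
  | [] => simp [chainB]
  | [x] => simp [chainB]
  | p :: c :: t =>
    have ih := allIdx_chainB (c :: t)
    simp only [List.dropLast_cons₂, List.drop_succ_cons, List.drop_zero, List.length_cons, chainB]
    rw [List.range_succ_eq_map]
    simp only [List.all_cons, List.all_map]
    by_cases h : c ≤ p
    · simp [h]
    · simp only [List.getD_cons_zero, h, decide_false, Bool.not_false, Bool.true_and]
      rw [← ih, show (c :: t).dropLast.length = t.length by simp]
      simp only [Function.comp_def, List.getElem?_cons_succ, List.getD_eq_getElem?_getD,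
        List.drop_one, List.tail_cons]
      simp only [if_false]
      rfl

theorem loopA_chain (z : List Int) :
    checkLoopA z.dropLast (z.drop 1) (PySem.List.pyRange 0 ((z.dropLast.length : Int)) 1)
      = chainB z := by
  rw [checkLoopA_eq_all, PySem.List.pyRange_zero_nat]
  rw [← allIdx_chainB z]
  rw [List.all_map]
  congr 1
  funext k
  simp [Function.comp, List.drop_one]

theorem check_eq_chain (a : List Int) : check a = chainB (sqd a) := by
  unfold check
  simp only [PySem.List.foldl_append_singleton_eq_map, List.nil_append]
  simp only [map_pyGetD_range_pred, map_pyGetD_range_drop1]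
  rw [map_pyGetD_range_zipWith a.dropLast (a.drop 1) (by simp), zipWith_sqd]
  exact loopA_chain (sqd a)

theorem altLoop_some (t : List Int) : ∀ (h pv : Int),
    altLoop (some pv) h t = chainB (pv :: sqd (h :: t)) := by
  match t with
  | [] => intro h pv; simp [altLoop, sqd, chainB]
  | c :: r =>
    intro h pv
    have ih := altLoop_some r c ((c - h) ^ 2)
    by_cases hc : (c - h) ^ 2 ≤ pv <;>
      simp [altLoop, sqd, chainB, hc, ih]

theorem altLoop_none (t : List Int) (h : Int) :
    altLoop none h t = chainB (sqd (h :: t)) := by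
  match t with
  | [] => simp [altLoop, sqd, chainB]
  | c :: r =>
    have ih := altLoop_some r c ((c - h) ^ 2)
    simp [altLoop, sqd, ih]

theorem check_alt_eq_chain (a : List Int) : check_alt a = chainB (sqd a) := by
  match a with
  | [] => simp [check_alt, sqd, chainB]
  | h :: t => exact altLoop_none t h

-- ===== VERDICT (by name: the statement is the Claim_ definition above) =====
theorem check_spec : Claim_equal_check := by
  intro a _
  unfold Spec_check
  rw [check_eq_chain, check_alt_eq_chain]
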